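-- pv_equiv track=rewrite | github.com/gr-rahimi/APSim | utility.py | get_interval
-- ===== SOURCE A (Python) =====
-- def get_interval(inp_list):
--     '''
--
--     :param inp_list: a list of integers
--     :return: a list of intervals [(x1,x2), (x3,x4),.....]
--     '''
--
--     inp_list.sort()
--
--     assert inp_list, 'empty list'
--
--     result =[]
--
--     new_start = prev_val = inp_list[0]
--     for new_sym in inp_list[1:]:
--         if new_sym == prev_val + 1:
--             prev_val = new_sym
--             continue
--         else:
--             result.append((new_start, prev_val))
--             new_start = prev_val = new_sym
--
--     result.append((new_start, prev_val))
--
--     return result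
-- ===== SOURCE B (Python) =====
-- def get_interval(inp_list):
--     '''
--
--     :param inp_list: a list of integers
--     :return: a list of intervals [(x1,x2), (x3,x4),.....]
--     '''
--
--     inp_list.sort()
--
--     assert inp_list, 'empty list'
--
--     n = len(inp_list)
--     breaks = [0] + [i for i in range(1, n) if inp_list[i] != inp_list[i - 1] + 1] + [n]
--     return [(inp_list[s], inp_list[e - 1]) for s, e in zip(breaks, breaks[1:])]
-- ===== Notes on version B (the rewrite author's own statement) =====
-- stated objective: alternative
-- what changed: B replaces A's online new_start/prev_val state machine with a staged break-index construction: it first lists all indices where the sorted list's step is not +1, then turns adjacent break pairs into (first, last) intervals by direct indexing.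
import Mathlib
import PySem

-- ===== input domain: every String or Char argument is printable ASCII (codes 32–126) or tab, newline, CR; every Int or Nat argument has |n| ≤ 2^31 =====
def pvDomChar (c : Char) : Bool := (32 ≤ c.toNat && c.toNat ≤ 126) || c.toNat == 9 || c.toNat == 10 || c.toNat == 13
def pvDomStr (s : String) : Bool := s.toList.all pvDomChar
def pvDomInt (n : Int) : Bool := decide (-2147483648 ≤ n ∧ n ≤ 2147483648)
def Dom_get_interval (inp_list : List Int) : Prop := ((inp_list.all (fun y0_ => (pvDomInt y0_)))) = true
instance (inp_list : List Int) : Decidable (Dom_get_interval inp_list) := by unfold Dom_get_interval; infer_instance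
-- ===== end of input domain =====

-- B replaces A's online new_start/prev_val state machine with a staged break-index construction
-- (list the non-+1 step positions, then index adjacent break pairs); same cost. Both A and B sort
-- the argument in place in Python — the equivalence proved here is about the return value, both
-- perform the identical mutation.

-- ===== PORT A =====
-- A's for-loop over inp_list[1:] carrying (result, new_start, prev_val)
def getIntervalLoopA : List Int → Int → Int → List (Int × Int) → List (Int × Int)
  | [], new_start, prev_val, result => result ++ [(new_start, prev_val)]
  | new_sym :: rest, new_start, prev_val, result =>
      if new_sym = prev_val + 1 then
        getIntervalLoopA rest new_start new_sym result
      else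
        getIntervalLoopA rest new_sym new_sym (result ++ [(new_start, prev_val)])

def get_interval (inp_list : List Int) : List (Int × Int) :=
  match PySem.List.sorted inp_list (fun x => x) false with
  | [] => []  -- unreachable: the Python assert raises here (excluded by Pre_)
  | x :: rest => getIntervalLoopA rest x x []

-- ===== PORT B =====
-- all indexing in Source B is with in-range non-negative indices, so xs.getD i 0 is exact
def get_interval_alt (inp_list : List Int) : List (Int × Int) :=
  let xs := PySem.List.sorted inp_list (fun x => x) false
  match xs with
  | [] => []  -- unreachable: the Python assert raises here (excluded by Pre_)
  | _ :: _ =>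
    let n := xs.length
    let breaks := [0] ++ (List.range' 1 (n - 1)).filter
        (fun i => decide (xs.getD i 0 ≠ xs.getD (i - 1) 0 + 1)) ++ [(n : Nat)]
    (breaks.zip (breaks.drop 1)).map (fun p => (xs.getD p.1 0, xs.getD (p.2 - 1) 0))

-- ===== PRECONDITION & SPEC =====
-- A raises AssertionError on the empty list ('assert inp_list'); B does the same, so exactly that input is excluded.
def Pre_get_interval (inp_list : List Int) : Prop := inp_list ≠ []
instance (inp_list : List Int) : Decidable (Pre_get_interval inp_list) := by unfold Pre_get_interval; infer_instance
def pvWitness_get_interval : List Int := [3, 1, 2, 7]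

def Spec_get_interval (inp_list : List Int) (out : List (Int × Int)) : Prop := out = get_interval_alt inp_list
instance (inp_list : List Int) (out : List (Int × Int)) : Decidable (Spec_get_interval inp_list out) := by unfold Spec_get_interval; infer_instance

-- ===== CLAIM (what is proved, stated in full; the proofs are below) =====
def Claim_equal_get_interval : Prop := ∀ (inp_list : List Int), Dom_get_interval inp_list → Pre_get_interval inp_list → Spec_get_interval inp_list (get_interval inp_list)

-- ===== LEMMAS AND PROOFS =====

-- canonical recursive description of A's run decomposition
def specRuns : Int → Int → List Int → List (Int × Int)
  | ns, pv, [] => [(ns, pv)]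
  | ns, pv, v :: t => if v = pv + 1 then specRuns ns v t else (ns, pv) :: specRuns v v t

theorem loopA_eq_specRuns (t : List Int) (ns pv : Int) (res : List (Int × Int)) :
    getIntervalLoopA t ns pv res = res ++ specRuns ns pv t := by
  induction t generalizing ns pv res with
  | nil => simp [getIntervalLoopA, specRuns]
  | cons v r ih =>
      simp only [getIntervalLoopA, specRuns]
      split
      · exact ih _ _ _
      · rw [ih]; simp

-- the break indices of xs that are ≥ j, together with the final sentinel xs.length
def brks (xs : List Int) (j : Nat) : List Nat :=
  (List.range' j (xs.length - j)).filter
    (fun i => decide (xs.getD i 0 ≠ xs.getD (i - 1) 0 + 1)) ++ [xs.length]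

theorem specRuns_brks (xs : List Int) (k : Nat) :
    ∀ j s, 1 ≤ j → j ≤ xs.length → xs.length - j ≤ k →
      specRuns (xs.getD s 0) (xs.getD (j - 1) 0) (xs.drop j)
        = ((s :: brks xs j).zip (brks xs j)).map
            (fun p => (xs.getD p.1 0, xs.getD (p.2 - 1) 0)) := by
  induction k with
  | zero =>
      intro j s h1 h2 hk
      have hj : j = xs.length := by omega
      subst hj
      simp [brks, specRuns, List.drop_eq_nil_of_le (le_refl xs.length)]
  | succ k ih =>
      intro j s h1 h2 hk
      by_cases hj : j < xs.length
      · have hdrop : xs.drop j = xs[j] :: xs.drop (j + 1) := List.drop_eq_getElem_cons hj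
        have hrange : List.range' j (xs.length - j) = j :: List.range' (j + 1) (xs.length - (j + 1)) := by
          have : xs.length - j = (xs.length - (j + 1)) + 1 := by omega
          rw [this, List.range'_succ]
        have hgj : xs.getD j 0 = xs[j] := List.getD_eq_getElem xs 0 hj
        by_cases hb : xs[j] = xs.getD (j - 1) 0 + 1
        · -- no break at j: run continues
          have hb' : xs.getD j 0 = xs.getD (j - 1) 0 + 1 := by rw [hgj]; exact hb
          have hcond : (decide (xs.getD j 0 ≠ xs.getD (j - 1) 0 + 1)) = false :=
            decide_eq_false (not_not_intro hb')
          have hfilter : brks xs j = brks xs (j + 1) := by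
            unfold brks
            rw [hrange, List.filter_cons, hcond]
            simp
          rw [hdrop]
          simp only [specRuns]
          rw [if_pos hb, ← hgj, hfilter]
          have := ih (j + 1) s (by omega) (by omega) (by omega)
          rwa [Nat.add_sub_cancel] at this
        · -- break at j: emit current run
          have hb' : xs.getD j 0 ≠ xs.getD (j - 1) 0 + 1 := by rw [hgj]; exact hb
          have hcond : (decide (xs.getD j 0 ≠ xs.getD (j - 1) 0 + 1)) = true :=
            decide_eq_true hb'
          have hfilter : brks xs j = j :: brks xs (j + 1) := by
            unfold brks
            rw [hrange, List.filter_cons, hcond]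
            simp
          rw [hdrop]
          simp only [specRuns]
          rw [if_neg hb, hfilter]
          simp only [List.zip_cons_cons, List.map_cons]
          have := ih (j + 1) j (by omega) (by omega) (by omega)
          rw [Nat.add_sub_cancel] at this
          rw [← hgj, ← this]
      · have hj' : j = xs.length := by omega
        subst hj'
        simp [brks, specRuns, List.drop_eq_nil_of_le (le_refl xs.length)]

-- ===== VERDICT (by name: the statement is the Claim_ definition above) =====
theorem get_interval_spec : Claim_equal_get_interval := by
  intro inp_list _ _
  unfold Spec_get_interval get_interval get_interval_alt
  cases h : PySem.List.sorted inp_list (fun x => x) false with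
  | nil => rfl
  | cons x rest =>
      show getIntervalLoopA rest x x []
        = (((0 :: ((List.range' 1 ((x :: rest).length - 1)).filter
              (fun i => decide ((x :: rest).getD i 0 ≠ (x :: rest).getD (i - 1) 0 + 1)) ++ [(x :: rest).length])).zip
            (((List.range' 1 ((x :: rest).length - 1)).filter
              (fun i => decide ((x :: rest).getD i 0 ≠ (x :: rest).getD (i - 1) 0 + 1)) ++ [(x :: rest).length]))).map
            (fun p => ((x :: rest).getD p.1 0, (x :: rest).getD (p.2 - 1) 0)))
  
      rw [loopA_eq_specRuns, List.nil_append]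
      have := specRuns_brks (x :: rest) (x :: rest).length 1 0 (by omega) (by simp) (by omega)
      simp only [brks] at this
      simpa using this
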